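-- pv_equiv track=rewrite | github.com/Praveen10/problemSolving | festiveLight.py | flashing_lights
-- ===== SOURCE A (Python) =====
-- def flashing_lights(lights):
--     temp = 2
--     res = []
--     for i in range(len(lights)):
--         if (i + 1) == len(lights):
--             res.append(lights[i])
--         elif i == temp:
--             if lights[i] == 0:
--                 res.append(1)
--             else:
--                 res.append(0)
--             temp += 3
--         else:
--             res.append(lights[i])
--     return res
-- ===== SOURCE B (Python) =====
-- def flashing_lights(lights):
--     res = list(lights)
--     i = 2
--     while i < len(lights) - 1:
--         res[i] = 1 if res[i] == 0 else 0
--         i += 3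
--     return res
-- ===== Notes on version B (the rewrite author's own statement) =====
-- stated objective: simpler
-- what changed: Instead of A's per-element pass that branches on every index while threading a 'temp' counter, B copies the list once and then walks only the toggle positions 2, 5, 8, ... (< len-1) with a strided in-place update.
import Mathlib
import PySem

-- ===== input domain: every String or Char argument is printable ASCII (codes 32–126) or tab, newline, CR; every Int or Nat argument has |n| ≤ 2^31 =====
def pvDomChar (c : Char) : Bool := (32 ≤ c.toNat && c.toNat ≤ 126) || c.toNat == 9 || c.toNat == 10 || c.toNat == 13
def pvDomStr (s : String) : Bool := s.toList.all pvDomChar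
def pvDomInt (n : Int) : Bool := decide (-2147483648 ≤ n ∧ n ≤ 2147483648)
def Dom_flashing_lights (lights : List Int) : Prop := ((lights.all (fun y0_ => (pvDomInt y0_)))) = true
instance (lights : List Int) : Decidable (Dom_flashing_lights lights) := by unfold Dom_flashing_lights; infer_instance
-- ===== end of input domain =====

-- B is simpler: it copies the list once and walks only the toggle positions 2, 5, 8, … (< len-1)
-- with a strided in-place update, instead of A's per-element branching pass with a 'temp' counter.

-- ===== PORT A =====
-- loop body of A: state is (temp, res), i the current index of range(len(lights))
def pvStepA (lights : List Int) (n : Int) (st : Int × List Int) (i : Int) : Int × List Int :=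
  if i + 1 = n then (st.1, st.2 ++ [PySem.List.pyGetD lights i 0])
  else if i = st.1 then
    (st.1 + 3, st.2 ++ [if PySem.List.pyGetD lights i 0 = 0 then (1 : Int) else 0])
  else (st.1, st.2 ++ [PySem.List.pyGetD lights i 0])

def flashing_lights (lights : List Int) : List Int :=
  ((PySem.List.pyRange 0 (lights.length : Int) 1).foldl
    (pvStepA lights (lights.length : Int)) (2, [])).2

-- ===== PORT B =====
-- the while loop of Source B: 'while i < len(lights) - 1: res[i] = 1 if res[i] == 0 else 0; i += 3'
def pvLoopB (n : Int) (res : List Int) (i : Int) : List Int :=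
  if h : i < n - 1 then
    pvLoopB n (PySem.List.pySetD res i (if PySem.List.pyGetD res i 0 = 0 then (1 : Int) else 0)) (i + 3)
  else res
termination_by (n - 1 - i).toNat
decreasing_by omega

def flashing_lights_alt (lights : List Int) : List Int :=
  pvLoopB (lights.length : Int) lights 2

-- ===== PRECONDITION & SPEC =====
def Spec_flashing_lights (lights : List Int) (out : List Int) : Prop := out = flashing_lights_alt lights
instance (lights : List Int) (out : List Int) : Decidable (Spec_flashing_lights lights out) := by unfold Spec_flashing_lights; infer_instance

-- ===== CLAIM (what is proved, stated in full; the proofs are below) =====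
def Claim_equal_flashing_lights : Prop := ∀ (lights : List Int), Dom_flashing_lights lights → Spec_flashing_lights lights (flashing_lights lights)

-- ===== LEMMAS AND PROOFS =====

-- the common per-index value both programs produce
def pvCell (lights : List Int) (n i : Int) : Int :=
  if i + 1 = n then PySem.List.pyGetD lights i 0
  else if i % 3 = 2 then (if PySem.List.pyGetD lights i 0 = 0 then 1 else 0)
  else PySem.List.pyGetD lights i 0

-- A's loop appends exactly pvCell at each index, given the 'temp' invariant
theorem pvLoopA_spec (lights : List Int) (n : Int) :
    ∀ i t res, 0 ≤ i → i ≤ t → t < i + 3 → t % 3 = 2 →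
      ((PySem.List.pyRange i n 1).foldl (pvStepA lights n) (t, res)).2
        = res ++ (PySem.List.pyRange i n 1).map (pvCell lights n) := by
  intro i t res hi hit ht3 htm
  by_cases hin : i < n
  · rw [PySem.List.pyRange_one_cons hin]
    have : (n - (i + 1)).toNat < (n - i).toNat := by omega
    simp only [List.foldl_cons, List.map_cons]
    rcases Decidable.em (i + 1 = n) with hlast | hlast
    · rw [show PySem.List.pyRange (i+1) n 1 = [] from PySem.List.pyRange_one_eq_nil (by omega)]
      have hstep : pvStepA lights n (t, res) i = (t, res ++ [PySem.List.pyGetD lights i 0]) := by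
        unfold pvStepA; rw [if_pos hlast]
      rw [hstep]
      simp [pvCell, hlast]
    · by_cases hhit : i = t
      · have hstep : pvStepA lights n (t, res) i
            = (t + 3, res ++ [if PySem.List.pyGetD lights i 0 = 0 then (1:Int) else 0]) := by
          unfold pvStepA; rw [if_neg hlast, if_pos hhit]
        rw [hstep, pvLoopA_spec lights n (i+1) (t+3) _ (by omega) (by omega) (by omega) (by omega)]
        have h2 : i % 3 = 2 := by omega
        simp [pvCell, hlast, h2]
      · have hstep : pvStepA lights n (t, res) i
            = (t, res ++ [PySem.List.pyGetD lights i 0]) := by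
          unfold pvStepA; rw [if_neg hlast, if_neg hhit]
        rw [hstep, pvLoopA_spec lights n (i+1) t _ (by omega) (by omega) (by omega) htm]
        have h2 : ¬ i % 3 = 2 := by omega
        simp [pvCell, hlast, h2]
  · rw [show PySem.List.pyRange i n 1 = [] from PySem.List.pyRange_one_eq_nil (by omega)]
    simp
termination_by i => (n - i).toNat
decreasing_by all_goals omega

theorem pvLoopB_length (n : Int) : ∀ res i, (pvLoopB n res i).length = res.length := by
  intro res i
  unfold pvLoopB
  split
  · rw [pvLoopB_length n _ (i + 3), PySem.List.length_pySetD]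
  · rfl
termination_by res i => (n - 1 - i).toNat
decreasing_by omega

-- B's loop toggles exactly the indices ≥ i congruent to i mod 3 and below n-1
theorem pvLoopB_getElem (n : Int) :
    ∀ res i, 0 ≤ i → ∀ (j : Nat) (hj : j < res.length),
      (pvLoopB n res i)[j]'(by rw [pvLoopB_length]; exact hj)
        = if i ≤ (j : Int) ∧ (j : Int) % 3 = i % 3 ∧ (j : Int) < n - 1
          then (if res[j] = 0 then 1 else 0) else res[j] := by
  intro res i hi j hj
  unfold pvLoopB
  split
  · rename_i hlt
    by_cases hin : i < (res.length : Int)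
    · have hset : PySem.List.pySetD res i (if PySem.List.pyGetD res i 0 = 0 then (1:Int) else 0)
          = res.set i.toNat (if res[i.toNat]'(by omega) = 0 then 1 else 0) := by
        rw [PySem.List.pySetD_of_nonneg res _ hi, PySem.List.pyGetD_eq_getElem res 0 hi hin]
      rw [pvLoopB_getElem n _ (i + 3) (by omega) j (by rw [hset]; simpa using hj)]
      simp only [hset]
      by_cases hji : (j : Int) = i
      · have hjt : j = i.toNat := by omega
        subst hjt
        simp only [List.getElem_set_self]
        have h1 : ¬ (i + 3 ≤ (i.toNat : Int) ∧ (i.toNat : Int) % 3 = (i + 3) % 3 ∧ (i.toNat : Int) < n - 1) := by omega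
        have h2 : i ≤ (i.toNat : Int) ∧ (i.toNat : Int) % 3 = i % 3 ∧ (i.toNat : Int) < n - 1 := by omega
        rw [if_neg h1, if_pos h2]
      · rw [List.getElem_set_ne (by omega)]
        have hcond : (i + 3 ≤ (j : Int) ∧ (j : Int) % 3 = (i + 3) % 3 ∧ (j : Int) < n - 1)
            ↔ (i ≤ (j : Int) ∧ (j : Int) % 3 = i % 3 ∧ (j : Int) < n - 1) := by omega
        rw [if_congr hcond rfl rfl]
    · -- i out of range: pySetD leaves res unchanged
      have hnone : PySem.List.pySet? res i (if PySem.List.pyGetD res i 0 = 0 then (1:Int) else 0) = none :=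
        (PySem.List.pySet?_eq_none_iff _ _ _).mpr (by simp [PySem.Raise.InRange]; omega)
      have hset : PySem.List.pySetD res i (if PySem.List.pyGetD res i 0 = 0 then (1:Int) else 0) = res := by
        simp [PySem.List.pySetD, hnone]
      rw [pvLoopB_getElem n _ (i + 3) (by omega) j (by rw [hset]; exact hj)]
      simp only [hset]
      have hcond : (i + 3 ≤ (j : Int) ∧ (j : Int) % 3 = (i + 3) % 3 ∧ (j : Int) < n - 1)
          ↔ (i ≤ (j : Int) ∧ (j : Int) % 3 = i % 3 ∧ (j : Int) < n - 1) := by omega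
      rw [if_congr hcond rfl rfl]
  · rename_i hge
    have : ¬ (i ≤ (j : Int) ∧ (j : Int) % 3 = i % 3 ∧ (j : Int) < n - 1) := by omega
    simp [this]
termination_by res i => (n - 1 - i).toNat
decreasing_by all_goals omega

-- ===== VERDICT (by name: the statement is the Claim_ definition above) =====
theorem flashing_lights_spec : Claim_equal_flashing_lights := by
  intro lights _
  unfold Spec_flashing_lights flashing_lights flashing_lights_alt
  rw [pvLoopA_spec lights (lights.length : Int) 0 2 [] (by omega) (by omega) (by omega) (by omega)]
  apply List.ext_getElem
  · rw [pvLoopB_length]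
    simp [PySem.List.length_pyRange_one]
  · intro j hjA hjB
    have hjn : j < lights.length := by
      simpa [PySem.List.length_pyRange_one] using hjA
    rw [pvLoopB_getElem (lights.length : Int) lights 2 (by omega) j hjn]
    simp only [List.nil_append, List.getElem_map, PySem.List.getElem_pyRange_one, zero_add]
    unfold pvCell
    rw [PySem.List.pyGetD_eq_getElem lights 0 (by omega) (by exact_mod_cast hjn)]
    simp only [Int.toNat_natCast]
    rcases Decidable.em ((j : Int) + 1 = (lights.length : Int)) with hlast | hlast
    · have h1 : ¬ (2 ≤ (j : Int) ∧ (j : Int) % 3 = 2 % 3 ∧ (j : Int) < (lights.length : Int) - 1) := by omega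
      simp only [if_pos hlast, if_neg h1]
    · by_cases h3 : (j : Int) % 3 = 2
      · have h1 : 2 ≤ (j : Int) ∧ (j : Int) % 3 = 2 % 3 ∧ (j : Int) < (lights.length : Int) - 1 := by omega
        simp only [if_neg hlast, if_pos h3, if_pos h1]
        rfl
      · have h1 : ¬ (2 ≤ (j : Int) ∧ (j : Int) % 3 = 2 % 3 ∧ (j : Int) < (lights.length : Int) - 1) := by omega
        simp only [if_neg hlast, if_neg h3, if_neg h1]
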